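-- pv_equiv track=rewrite | github.com/aroramanish2009/notes | pymisc/aoc-2023/dec10/script.py | finddist2
-- ===== SOURCE A (Python) =====
-- def finddist2(loc1,loc2,dotallrow,dotallcol):
--     loc1a,loc1b = loc1
--     loc2a,loc2b = loc2
--     loc1a,loc2a = min(loc1a,loc2a), max(loc1a,loc2a)
--     loc1b,loc2b = min(loc1b,loc2b), max(loc1b,loc2b)
--     senddata = 0
--     for i in range(loc1a, loc2a):
--         senddata += 1
--         if dotallrow[i]:
--             senddata += 10**6 - 1
--     for j in range(loc1b, loc2b):
--         senddata += 1
--         if dotallcol[j]: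
--             senddata += 10**6 - 1
--     return (senddata)
-- ===== SOURCE B (Python) =====
-- def finddist2(loc1, loc2, dotallrow, dotallcol):
--     def count(d, lo, hi):
--         # weighted size of [lo, hi): each flagged cell costs 10**6, any other cell 1
--         if hi <= lo:
--             return 0
--         if hi == lo + 1:
--             return 10 ** 6 if d[lo] else 1
--         mid = (lo + hi) // 2
--         return count(d, lo, mid) + count(d, mid, hi)
--     return (count(dotallrow, min(loc1[0], loc2[0]), max(loc1[0], loc2[0]))
--             + count(dotallcol, min(loc1[1], loc2[1]), max(loc1[1], loc2[1])))
-- ===== Notes on version B (the rewrite author's own statement) =====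
-- stated objective: alternative
-- what changed: Replaces A's fused accumulator loops over the two ranges by a divide-and-conquer recursion that splits each normalized interval at its midpoint and scores every unit interval directly as 10**6 (flagged) or 1, summing the halves with no running accumulator.
import Mathlib
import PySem

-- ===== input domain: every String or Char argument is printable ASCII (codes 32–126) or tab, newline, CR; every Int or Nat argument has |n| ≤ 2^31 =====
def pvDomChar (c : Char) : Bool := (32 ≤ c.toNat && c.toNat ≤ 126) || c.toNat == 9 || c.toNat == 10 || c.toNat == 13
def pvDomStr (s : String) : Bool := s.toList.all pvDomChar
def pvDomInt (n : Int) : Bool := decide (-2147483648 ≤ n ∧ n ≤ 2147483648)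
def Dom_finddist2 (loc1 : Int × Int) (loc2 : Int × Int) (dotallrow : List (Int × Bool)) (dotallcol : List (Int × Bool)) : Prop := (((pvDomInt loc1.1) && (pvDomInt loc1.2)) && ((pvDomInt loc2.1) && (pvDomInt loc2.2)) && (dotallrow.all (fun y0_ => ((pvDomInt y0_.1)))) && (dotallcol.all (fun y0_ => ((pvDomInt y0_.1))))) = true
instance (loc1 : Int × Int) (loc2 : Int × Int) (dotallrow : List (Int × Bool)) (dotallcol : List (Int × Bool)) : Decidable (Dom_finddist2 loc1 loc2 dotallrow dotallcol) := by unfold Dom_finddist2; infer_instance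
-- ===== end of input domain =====

-- ===== PORT A =====
-- B replaces A's fused accumulator loops by a midpoint divide-and-conquer recursion over each
-- normalized interval (a unit interval scores 10^6 if flagged, else 1); same cost, no claim beyond the theorems.
-- dict indexing dotallrow[i] / dotallcol[j] raises KeyError on a missing key; Pre_ excludes those
-- inputs, so the `.getD false` default below is never reached on admitted inputs
-- (first-match association-list lookup = dict lookup).
def finddist2 (loc1 : Int × Int) (loc2 : Int × Int) (dotallrow : List (Int × Bool)) (dotallcol : List (Int × Bool)) : Int :=
  let a1 := min loc1.1 loc2.1
  let a2 := max loc1.1 loc2.1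
  let b1 := min loc1.2 loc2.2
  let b2 := max loc1.2 loc2.2
  let s1 := (PySem.List.pyRange a1 a2 1).foldl
    (fun senddata i =>
      let senddata := senddata + 1
      if (dotallrow.lookup i).getD false then senddata + (10 ^ 6 - 1) else senddata) 0
  (PySem.List.pyRange b1 b2 1).foldl
    (fun senddata j =>
      let senddata := senddata + 1
      if (dotallcol.lookup j).getD false then senddata + (10 ^ 6 - 1) else senddata) s1

-- ===== PORT B =====
-- B's helper `count`: divide-and-conquer on the interval; midpoint (lo+hi)//2 = PySem.Int.floordiv (exact).
def pvCount (d : List (Int × Bool)) (lo hi : Int) : Int :=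
  if hi ≤ lo then 0
  else if hi = lo + 1 then (if (d.lookup lo).getD false then 10 ^ 6 else 1)
  else
    pvCount d lo (PySem.Int.floordiv (lo + hi) 2)
      + pvCount d (PySem.Int.floordiv (lo + hi) 2) hi
termination_by (hi - lo).toNat
decreasing_by
  all_goals
    rename_i h1 h2
    have hlo : lo + 1 ≤ PySem.Int.floordiv (lo + hi) 2 :=
      (PySem.Int.le_floordiv_iff_mul_le (by omega)).mpr (by omega)
    have hhi : PySem.Int.floordiv (lo + hi) 2 < hi :=
      (PySem.Int.floordiv_lt_iff_lt_mul (by omega)).mpr (by omega)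
    omega

def finddist2_alt (loc1 : Int × Int) (loc2 : Int × Int) (dotallrow : List (Int × Bool)) (dotallcol : List (Int × Bool)) : Int :=
  pvCount dotallrow (min loc1.1 loc2.1) (max loc1.1 loc2.1)
    + pvCount dotallcol (min loc1.2 loc2.2) (max loc1.2 loc2.2)

-- ===== PRECONDITION & SPEC =====
-- Pre_ excludes exactly the inputs on which both Pythons raise KeyError: some index in one of
-- the two normalized ranges is not a key of the corresponding dict (stated as a distinct-key
-- count so it is decidable fast even for huge intervals: the number of distinct keys inside
-- [min,max) equals the interval length iff every index of the interval is a key).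
def Pre_finddist2 (loc1 : Int × Int) (loc2 : Int × Int) (dotallrow : List (Int × Bool)) (dotallcol : List (Int × Bool)) : Prop :=
  ((dotallrow.map Prod.fst).dedup.filter
      (fun k => decide (min loc1.1 loc2.1 ≤ k) && decide (k < max loc1.1 loc2.1))).length
    = (max loc1.1 loc2.1 - min loc1.1 loc2.1).toNat ∧
  ((dotallcol.map Prod.fst).dedup.filter
      (fun k => decide (min loc1.2 loc2.2 ≤ k) && decide (k < max loc1.2 loc2.2))).length
    = (max loc1.2 loc2.2 - min loc1.2 loc2.2).toNat
instance (loc1 : Int × Int) (loc2 : Int × Int) (dotallrow : List (Int × Bool)) (dotallcol : List (Int × Bool)) : Decidable (Pre_finddist2 loc1 loc2 dotallrow dotallcol) := by unfold Pre_finddist2; infer_instance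

def pvWitness_finddist2 : (Int × Int) × (Int × Int) × (List (Int × Bool)) × (List (Int × Bool)) :=
  ((0, 1), (2, 3), [(0, true), (1, false)], [(1, true), (2, false)])

def Spec_finddist2 (loc1 : Int × Int) (loc2 : Int × Int) (dotallrow : List (Int × Bool)) (dotallcol : List (Int × Bool)) (out : Int) : Prop := out = finddist2_alt loc1 loc2 dotallrow dotallcol
instance (loc1 : Int × Int) (loc2 : Int × Int) (dotallrow : List (Int × Bool)) (dotallcol : List (Int × Bool)) (out : Int) : Decidable (Spec_finddist2 loc1 loc2 dotallrow dotallcol out) := by unfold Spec_finddist2; infer_instance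

-- ===== CLAIM (what is proved, stated in full; the proofs are below) =====
def Claim_equal_finddist2 : Prop := ∀ (loc1 : Int × Int) (loc2 : Int × Int) (dotallrow : List (Int × Bool)) (dotallcol : List (Int × Bool)), Dom_finddist2 loc1 loc2 dotallrow dotallcol → Pre_finddist2 loc1 loc2 dotallrow dotallcol → Spec_finddist2 loc1 loc2 dotallrow dotallcol (finddist2 loc1 loc2 dotallrow dotallcol)

-- ===== LEMMAS AND PROOFS =====
-- A's fused loop over any index list equals start + length + (10^6-1) * (number of truthy hits).
theorem finddist2_fold_eq (p : Int → Bool) :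
    ∀ (l : List Int) (s : Int),
      l.foldl (fun senddata i =>
        let senddata := senddata + 1
        if p i then senddata + (10 ^ 6 - 1) else senddata) s
      = s + l.length + (10 ^ 6 - 1) * (l.filter p).length := by
  intro l
  induction l with
  | nil => intro s; simp
  | cons x xs ih =>
    intro s
    simp only [List.foldl_cons]
    rw [ih]
    by_cases hx : p x
    · simp [hx]; ring
    · simp [hx]; ring

-- B's recursion on any interval [lo, hi] (lo ≤ hi) equals length + (10^6-1) * (number of truthy hits).
theorem pvCount_eq (d : List (Int × Bool)) :
    ∀ (n : Nat) (lo hi : Int), (hi - lo).toNat ≤ n → lo ≤ hi →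
      pvCount d lo hi
        = (hi - lo) + (10 ^ 6 - 1)
            * ((PySem.List.pyRange lo hi 1).filter (fun i => (d.lookup i).getD false)).length := by
  intro n
  induction n with
  | zero =>
    intro lo hi hn hle
    have : hi = lo := by omega
    subst this
    rw [pvCount, if_pos le_rfl, PySem.List.pyRange_one_eq_nil le_rfl]
    simp
  | succ m ih =>
    intro lo hi hn hle
    rw [pvCount]
    by_cases h0 : hi ≤ lo
    · rw [if_pos h0]
      have : hi = lo := le_antisymm h0 hle
      subst this
      rw [PySem.List.pyRange_one_eq_nil le_rfl]
      simp
    · rw [if_neg h0]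
      by_cases h1 : hi = lo + 1
      · rw [if_pos h1]
        subst h1
        rw [PySem.List.pyRange_one_singleton]
        by_cases hp : (d.lookup lo).getD false
        · simp [hp]
        · simp [hp]
      · rw [if_neg h1]
        have hlo : lo + 1 ≤ PySem.Int.floordiv (lo + hi) 2 :=
          (PySem.Int.le_floordiv_iff_mul_le (by omega)).mpr (by omega)
        have hhi : PySem.Int.floordiv (lo + hi) 2 < hi :=
          (PySem.Int.floordiv_lt_iff_lt_mul (by omega)).mpr (by omega)
        rw [ih lo (PySem.Int.floordiv (lo + hi) 2) (by omega) (by omega),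
          ih (PySem.Int.floordiv (lo + hi) 2) hi (by omega) (by omega),
          PySem.List.pyRange_one_append lo (PySem.Int.floordiv (lo + hi) 2) hi
            (by omega) (by omega),
          List.filter_append, List.length_append]
        push_cast
        ring

-- ===== VERDICT =====
theorem finddist2_spec : Claim_equal_finddist2 := by
  intro loc1 loc2 dotallrow dotallcol _ _
  unfold Spec_finddist2 finddist2 finddist2_alt
  rw [finddist2_fold_eq, finddist2_fold_eq,
    pvCount_eq dotallrow (max loc1.1 loc2.1 - min loc1.1 loc2.1).toNat _ _ le_rfl min_le_max,
    pvCount_eq dotallcol (max loc1.2 loc2.2 - min loc1.2 loc2.2).toNat _ _ le_rfl min_le_max,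
    PySem.List.length_pyRange_one, PySem.List.length_pyRange_one]
  have h1 : min loc1.1 loc2.1 ≤ max loc1.1 loc2.1 := min_le_max
  have h2 : min loc1.2 loc2.2 ≤ max loc1.2 loc2.2 := min_le_max
  push_cast
  omega
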